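-- pv_equiv track=rewrite | github.com/awslabs/nki-autotune | nkigym/src/nkigym/transforms/block_merge.py | find_adjacent_pairs
-- ===== SOURCE A (Python) =====
-- def find_adjacent_pairs(
--     items: list[tuple[int, tuple[tuple[int, int], ...]]], limits: tuple[int, ...]
-- ) -> list[tuple[int, int, int, tuple[int, int]]]:
--     """Find all adjacent (idx_a, idx_b, dim, merged_range) via end-to-start matching.
--
--     For each dimension d, groups items by all other dimensions, then matches
--     items whose end on dim d equals another item's start. O(n * ndim) instead
--     of O(n^2).
--
--     Args:
--         items: List of (index, slices) pairs.
--         limits: Per-dimension maximum merged size.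
--
--     Returns:
--         List of (idx_a, idx_b, dim, merged_range) tuples.
--     """
--     results: list[tuple[int, int, int, tuple[int, int]]] = []
--     ndim = len(items[0][1]) if items else 0
--     for d in range(ndim):
--         _adjacent_on_dim(items, d, limits, results)
--     return results
--
-- def _adjacent_on_dim(
--     items: list[tuple[int, tuple[tuple[int, int], ...]]],
--     dim: int,
--     limits: tuple[int, ...],
--     results: list[tuple[int, int, int, tuple[int, int]]],
-- ) -> None:
--     """Find adjacent pairs on a single dimension via end-to-start matching.
--
--     Groups items by non-target dimensions, then within each subgroup
--     matches items whose end on dim equals another's start. Inlined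
--     for performance (eliminates 4.5M function calls in the search).
--
--     Args:
--         items: List of (index, slices) pairs.
--         dim: Dimension to check adjacency on.
--         limits: Per-dimension maximum merged size.
--         results: Mutable list to append results to.
--     """
--     subgroups: dict[tuple[tuple[int, int], ...], list[tuple[int, tuple[tuple[int, int], ...]]]] = {}
--     for idx, slices in items:
--         other = slices[:dim] + slices[dim + 1 :]
--         subgroups.setdefault(other, []).append((idx, slices))
--     limit = limits[dim]
--     for sub in subgroups.values():
--         by_end: dict[int, list[tuple[int, tuple[tuple[int, int], ...]]]] = {}
--         for idx, slices in sub: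
--             by_end.setdefault(slices[dim][1], []).append((idx, slices))
--         for idx, slices in sub:
--             for m_idx, m_slices in by_end.get(slices[dim][0], []):
--                 merged_start = m_slices[dim][0]
--                 merged_end = slices[dim][1]
--                 if merged_end - merged_start <= limit:
--                     results.append((m_idx, idx, dim, (merged_start, merged_end)))
-- ===== SOURCE B (Python) =====
-- def find_adjacent_pairs(items, limits):
--     """Dict-free re-implementation: ordered-dedup subgroup keys + filtered
--     comprehensions and a direct nested scan, instead of setdefault buckets
--     and a by_end index."""
--     results = []
--     ndim = len(items[0][1]) if items else 0
--     for d in range(ndim):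
--         limit = limits[d]
--         keys = list(dict.fromkeys(s[:d] + s[d + 1:] for _, s in items))
--         for k in keys:
--             sub = [(i, s) for i, s in items if s[:d] + s[d + 1:] == k]
--             for idx, s in sub:
--                 results.extend(
--                     (m_idx, idx, d, (ms[d][0], s[d][1]))
--                     for m_idx, ms in sub
--                     if ms[d][1] == s[d][0] and s[d][1] - ms[d][0] <= limit
--                 )
--     return results
-- ===== Notes on version B (the rewrite author's own statement) =====
-- stated objective: alternative
-- what changed: Replaced A's two grouping dicts (setdefault subgroup buckets and the per-subgroup by_end index) by an ordered dedup of subgroup keys with filter comprehensions and a direct nested scan of each subgroup, producing results in the identical order.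
import Mathlib
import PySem

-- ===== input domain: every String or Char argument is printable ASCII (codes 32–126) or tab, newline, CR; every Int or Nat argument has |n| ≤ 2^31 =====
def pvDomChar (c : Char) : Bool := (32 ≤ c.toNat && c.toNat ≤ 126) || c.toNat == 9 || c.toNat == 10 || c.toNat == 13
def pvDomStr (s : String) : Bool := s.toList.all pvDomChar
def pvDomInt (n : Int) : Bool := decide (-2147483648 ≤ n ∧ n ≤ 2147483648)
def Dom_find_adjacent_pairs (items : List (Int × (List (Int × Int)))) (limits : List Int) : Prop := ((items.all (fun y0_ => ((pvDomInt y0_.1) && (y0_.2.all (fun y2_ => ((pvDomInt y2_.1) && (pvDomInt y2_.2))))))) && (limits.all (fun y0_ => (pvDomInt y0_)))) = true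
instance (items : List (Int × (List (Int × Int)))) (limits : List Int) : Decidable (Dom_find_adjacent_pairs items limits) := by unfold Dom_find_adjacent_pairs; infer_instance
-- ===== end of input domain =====

-- B replaces A's two grouping dicts (setdefault subgroup buckets and the by_end index)
-- by an ordered dedup of the subgroup keys with filter comprehensions and a direct
-- nested scan of each subgroup; objective: alternative (same results, same order).

-- ===== PORT A =====
-- _adjacent_on_dim: the setdefault(...).append(...) grouping loops are ported with
-- Dict.modify (d[k] = d.get(k, []) + [x]), the PySem grouping-loop form.
-- limits[dim] / slices[dim] are in range under Pre_; out of range the port takes a default.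
def pvAdjacentOnDim (items : List (Int × (List (Int × Int)))) (dim : Nat)
    (limits : List Int) (results : List (Int × Int × Int × (Int × Int))) :
    List (Int × Int × Int × (Int × Int)) :=
  let subgroups : PySem.Dict (List (Int × Int)) (List (Int × (List (Int × Int)))) :=
    items.foldl (fun d p =>
      d.modify (PySem.List.slice p.2 none (some (dim : Int)) ++
                PySem.List.slice p.2 (some ((dim : Int) + 1)) none) [] (· ++ [p]))
      PySem.Dict.empty
  let limit := (PySem.List.pyGet? limits (dim : Int)).getD 0
  subgroups.values.foldl (fun results sub =>
    let by_end : PySem.Dict Int (List (Int × (List (Int × Int)))) :=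
      sub.foldl (fun d p =>
        d.modify ((PySem.List.pyGet? p.2 (dim : Int)).getD (0, 0)).2 [] (· ++ [p]))
        PySem.Dict.empty
    sub.foldl (fun results p =>
      (by_end.getD ((PySem.List.pyGet? p.2 (dim : Int)).getD (0, 0)).1 []).foldl
        (fun results m =>
          let merged_start := ((PySem.List.pyGet? m.2 (dim : Int)).getD (0, 0)).1
          let merged_end := ((PySem.List.pyGet? p.2 (dim : Int)).getD (0, 0)).2
          if merged_end - merged_start ≤ limit then
            results ++ [(m.1, p.1, (dim : Int), (merged_start, merged_end))]
          else results)
        results)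
      results)
    results

def pvNdimA (items : List (Int × (List (Int × Int)))) : Nat :=
  match items with | [] => 0 | p :: _ => p.2.length

def find_adjacent_pairs (items : List (Int × (List (Int × Int)))) (limits : List Int) :
    List (Int × Int × Int × (Int × Int)) :=
  (List.range (pvNdimA items)).foldl
    (fun results d => pvAdjacentOnDim items d limits results) []

-- ===== PORT B =====
-- dict.fromkeys(...) as ordered dedup is PySem.List.dedup; the comprehensions are filters/maps.
-- Source B computes ndim by the identical expression, so it reuses pvNdimA.
def pvDimB (items : List (Int × (List (Int × Int)))) (limits : List Int) (d : Nat)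
    (results : List (Int × Int × Int × (Int × Int))) :
    List (Int × Int × Int × (Int × Int)) :=
  let limit := (PySem.List.pyGet? limits (d : Int)).getD 0
  let keys := PySem.List.dedup (items.map (fun p =>
    PySem.List.slice p.2 none (some (d : Int)) ++
    PySem.List.slice p.2 (some ((d : Int) + 1)) none))
  keys.foldl (fun results k =>
    let sub := items.filter (fun p =>
      (PySem.List.slice p.2 none (some (d : Int)) ++
        PySem.List.slice p.2 (some ((d : Int) + 1)) none) == k)
    sub.foldl (fun results p =>
      results ++
        (sub.filter (fun m =>
            ((PySem.List.pyGet? m.2 (d : Int)).getD (0, 0)).2 ==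
              ((PySem.List.pyGet? p.2 (d : Int)).getD (0, 0)).1 &&
            decide (((PySem.List.pyGet? p.2 (d : Int)).getD (0, 0)).2 -
              ((PySem.List.pyGet? m.2 (d : Int)).getD (0, 0)).1 ≤ limit))).map
          (fun m => (m.1, p.1, (d : Int),
            (((PySem.List.pyGet? m.2 (d : Int)).getD (0, 0)).1,
             ((PySem.List.pyGet? p.2 (d : Int)).getD (0, 0)).2))))
      results)
    results

def find_adjacent_pairs_alt (items : List (Int × (List (Int × Int)))) (limits : List Int) :
    List (Int × Int × Int × (Int × Int)) :=
  (List.range (pvNdimA items)).foldl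
    (fun results d => pvDimB items limits d results) []

-- ===== PRECONDITION & SPEC =====
-- Pre_ excludes exactly the inputs where Python A raises IndexError: nonempty items
-- whose first item has ndim dims while limits has fewer than ndim entries or some item
-- has fewer than ndim slices.
def Pre_find_adjacent_pairs (items : List (Int × (List (Int × Int)))) (limits : List Int) : Prop :=
  items = [] ∨
    ((items.headI).2.length ≤ limits.length ∧
      ∀ p ∈ items, (items.headI).2.length ≤ p.2.length)
instance (items : List (Int × (List (Int × Int)))) (limits : List Int) :
    Decidable (Pre_find_adjacent_pairs items limits) := by
  unfold Pre_find_adjacent_pairs; infer_instance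

def pvWitness_find_adjacent_pairs : (List (Int × (List (Int × Int)))) × List Int :=
  ([(0, [(0, 2)]), (1, [(2, 4)])], [4])

def Spec_find_adjacent_pairs (items : List (Int × (List (Int × Int)))) (limits : List Int) (out : List (Int × Int × Int × (Int × Int))) : Prop := out = find_adjacent_pairs_alt items limits
instance (items : List (Int × (List (Int × Int)))) (limits : List Int) (out : List (Int × Int × Int × (Int × Int))) : Decidable (Spec_find_adjacent_pairs items limits out) := by unfold Spec_find_adjacent_pairs; infer_instance

-- ===== CLAIM (what is proved, stated in full; the proofs are below) =====
def Claim_equal_find_adjacent_pairs : Prop := ∀ (items : List (Int × (List (Int × Int)))) (limits : List Int), Dom_find_adjacent_pairs items limits → Pre_find_adjacent_pairs items limits → Spec_find_adjacent_pairs items limits (find_adjacent_pairs items limits)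

-- ===== LEMMAS AND PROOFS =====

-- A grouping foldl's lookup is a filter of the source list.
theorem pv_getD_group {κ α : Type} [BEq κ] [LawfulBEq κ] (key : α → κ) (xs : List α) (v : κ) :
    (xs.foldl (fun d p => d.modify (key p) [] (· ++ [p])) PySem.Dict.empty).getD v []
      = xs.filter (fun p => key p == v) := by
  have h : xs.foldl (fun d p => d.modify (key p) [] (· ++ [p])) PySem.Dict.empty
      = (xs.map (fun p => (key p, p))).foldl
          (fun d q => d.modify q.1 [] (· ++ [q.2])) PySem.Dict.empty := by
    rw [List.foldl_map]
  rw [h, PySem.Dict.getD_foldl_modify_append, PySem.Dict.getD_empty, List.filter_map,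
    List.map_map]
  simp [Function.comp_def]

-- A grouping foldl's values: one filter per distinct key, in first-occurrence order.
theorem pv_values_group {κ α : Type} [BEq κ] [LawfulBEq κ] (key : α → κ) (xs : List α) :
    (xs.foldl (fun d p => d.modify (key p) [] (· ++ [p])) PySem.Dict.empty).values
      = (PySem.List.dedup (xs.map key)).map (fun k => xs.filter (fun p => key p == k)) := by
  have hnd : (xs.foldl (fun d p => d.modify (key p) [] (· ++ [p]))
      PySem.Dict.empty).keys.Nodup := by
    exact PySem.Dict.nodup_keys_foldl_modify_key xs key [] _ _ PySem.Dict.nodup_keys_empty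
  rw [PySem.Dict.values_eq_map_keys _ hnd [],
    PySem.Dict.keys_foldl_modify_key]
  simp only [PySem.Dict.keys_empty, PySem.Set.update_nil_left, PySem.List.dedup_eq_ofList]
  exact List.map_congr_left (fun k _ => pv_getD_group key xs k)

-- 'for x in l: if p x: out.append(f x)' with a Prop test.
theorem pv_foldl_append_ite {α β : Type} (p : α → Prop) [DecidablePred p] (f : α → β)
    (l : List α) (acc : List β) :
    l.foldl (fun acc x => if p x then acc ++ [f x] else acc) acc
      = acc ++ (l.filter (fun x => decide (p x))).map f := by
  induction l generalizing acc with
  | nil => simp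
  | cons x t ih =>
    by_cases h : p x <;> simp [h, ih]

theorem pv_per_dim (items : List (Int × (List (Int × Int)))) (limits : List Int) (d : Nat)
    (res : List (Int × Int × Int × (Int × Int))) :
    pvAdjacentOnDim items d limits res = pvDimB items limits d res := by
  simp only [pvAdjacentOnDim, pvDimB]
  rw [pv_values_group (fun p => PySem.List.slice p.2 none (some (d : Int)) ++
        PySem.List.slice p.2 (some ((d : Int) + 1)) none) items, List.foldl_map]
  apply PySem.List.foldl_congr_mem
  intro acc k _
  apply PySem.List.foldl_congr_mem
  intro acc2 p _
  have hb := pv_getD_group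
    (fun q : Int × List (Int × Int) => ((PySem.List.pyGet? q.2 (d : Int)).getD (0, 0)).2)
    (items.filter (fun p => (PySem.List.slice p.2 none (some (d : Int)) ++
      PySem.List.slice p.2 (some ((d : Int) + 1)) none) == k))
    ((PySem.List.pyGet? p.2 (d : Int)).getD (0, 0)).1
  rw [hb]
  have hc := pv_foldl_append_ite
    (fun m : Int × List (Int × Int) => ((PySem.List.pyGet? p.2 (d : Int)).getD (0, 0)).2 -
      ((PySem.List.pyGet? m.2 (d : Int)).getD (0, 0)).1 ≤
        (PySem.List.pyGet? limits (d : Int)).getD 0)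
    (fun m => (m.1, p.1, (d : Int),
      (((PySem.List.pyGet? m.2 (d : Int)).getD (0, 0)).1,
       ((PySem.List.pyGet? p.2 (d : Int)).getD (0, 0)).2)))
    ((items.filter (fun q => (PySem.List.slice q.2 none (some (d : Int)) ++
        PySem.List.slice q.2 (some ((d : Int) + 1)) none) == k)).filter
      (fun q => ((PySem.List.pyGet? q.2 (d : Int)).getD (0, 0)).2 ==
        ((PySem.List.pyGet? p.2 (d : Int)).getD (0, 0)).1))
    acc2
  rw [hc, List.filter_filter]
  congr 1
  congr 1
  apply List.filter_congr
  intro a _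
  rw [Bool.and_comm]

-- ===== VERDICT (by name: the statement is the Claim_ definition above) =====
theorem find_adjacent_pairs_spec : Claim_equal_find_adjacent_pairs := by
  intro items limits _ _
  unfold Spec_find_adjacent_pairs find_adjacent_pairs find_adjacent_pairs_alt
  apply PySem.List.foldl_congr_mem
  intro acc dd _
  exact pv_per_dim items limits dd acc
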